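-- pv_equiv track=rewrite | github.com/kevinbeirne1/2021_Advent_Of_Code | 15-chiton.py | increment_array
-- ===== SOURCE A (Python) =====
-- def increment_array(input_array):
--     width = len(input_array[0])
--     depth = len(input_array)
--
--     output = [[None for _ in range(width * 5)] for _ in range(depth * 5)]
--     for row, row_list in enumerate(input_array):
--         for col, val in enumerate(row_list):
--             for i in range(5):
--                 for j in range(5):
--                     col_index = col + i * width
--                     row_index = row + j * depth
--                     new_value = (val + i + j) % 9
--
--                     output[row_index][col_index] = new_value if new_value != 0 else 9
--
--     return output
-- ===== SOURCE B (Python) =====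
-- def increment_array(input_array):
--     # Gather formulation over the transposed grid: each output cell is computed
--     # directly, recovering its source cell and tile offsets with divmod index
--     # arithmetic and a closed-form wrap (v - 1 + i + j) % 9 + 1.
--     depth = len(input_array)
--     cols = list(zip(*input_array, strict=True))  # the grid's columns; a ragged grid raises ValueError
--     width = len(cols)
--     return [[(cols[c % width][r % depth] - 1 + c // width + r // depth) % 9 + 1
--              for c in range(width * 5)]
--             for r in range(depth * 5)]
-- ===== Notes on version B (the rewrite author's own statement) =====
-- stated objective: alternative
-- what changed: Replaces A's scatter (four nested loops writing each input cell into its 25 tile positions of a preallocated None grid) with a direct gather over the transposed grid: each output cell is computed once, recovering its source cell and tile offsets via divmod and the closed-form wrap (v-1+i+j)%9+1.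
import Mathlib
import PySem

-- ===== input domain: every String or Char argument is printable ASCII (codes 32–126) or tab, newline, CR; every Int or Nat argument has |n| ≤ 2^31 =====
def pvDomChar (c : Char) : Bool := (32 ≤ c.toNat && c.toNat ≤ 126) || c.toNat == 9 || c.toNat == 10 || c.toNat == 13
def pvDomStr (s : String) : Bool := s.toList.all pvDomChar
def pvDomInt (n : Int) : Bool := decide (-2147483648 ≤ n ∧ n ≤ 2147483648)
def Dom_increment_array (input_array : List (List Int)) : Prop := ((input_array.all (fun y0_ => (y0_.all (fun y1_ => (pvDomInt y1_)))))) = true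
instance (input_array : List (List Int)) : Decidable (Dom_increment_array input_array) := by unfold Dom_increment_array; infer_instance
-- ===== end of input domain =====

-- B rebuilds the tiled grid by a per-output-cell gather (divmod index recovery and a
-- closed-form wrap) instead of A's 25-fold scatter into a preallocated grid; same cost.


-- ===== PORT A =====
-- output[row_index][col_index] = v  (Python list assignment; indices here are always ≥ 0,
-- an out-of-range write raises in Python — such inputs are excluded by Pre_)
def pvSetCell (g : List (List (Option Int))) (r c : Int) (v : Int) : List (List (Option Int)) :=
  g.modify r.toNat (fun rw => rw.set c.toNat (some v))

-- Literal port of A: preallocate a None grid, then scatter each input cell into its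
-- 25 tile positions.  The final `.map (·.getD 0)` only bridges the Lean type
-- List (List (Option Int)) → List (List Int): under Pre_ every cell has been written,
-- so the default 0 is never used (Python just returns the filled grid).
def increment_array (input_array : List (List Int)) : List (List Int) :=
  let width : Int := (input_array.headD []).length
  let depth : Int := input_array.length
  let output0 : List (List (Option Int)) :=
    (List.range (depth * 5).toNat).map (fun _ =>
      (List.range (width * 5).toNat).map (fun _ => (none : Option Int)))
  let output :=
    (PySem.List.enumerate input_array 0).foldl (fun out rc =>
      (PySem.List.enumerate rc.2 0).foldl (fun out cv =>
        (PySem.List.pyRange 0 5 1).foldl (fun out i =>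
          (PySem.List.pyRange 0 5 1).foldl (fun out j =>
            let col_index := cv.1 + i * width
            let row_index := rc.1 + j * depth
            let new_value := PySem.Int.mod (cv.2 + i + j) 9
            pvSetCell out row_index col_index (if new_value ≠ 0 then new_value else 9))
          out) out) out) output0
  output.map (fun rw => rw.map (fun o => o.getD 0))

-- ===== PORT B =====
-- port of list(zip(*g, strict=True)): the columns of the grid, exact on rectangular g
-- (on a ragged grid Python raises ValueError, which Pre_ excludes)
def pvCols (g : List (List Int)) : List (List Int) :=
  (List.range (g.headD []).length).map (fun c => g.map (fun row => row.getD c 0))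

-- Literal port of B: gather over the transposed grid; divmod(r, depth) and
-- divmod(c, width) recover the tile offset and source cell.  The indexing
-- cols[c % width][r % depth] is in range under Pre_ (Python raises otherwise),
-- so getD is exact there.
def increment_array_alt (input_array : List (List Int)) : List (List Int) :=
  let depth := input_array.length
  let cols := pvCols input_array
  let width := cols.length
  (List.range (depth * 5)).map (fun r =>
    (List.range (width * 5)).map (fun c =>
      PySem.Int.mod ((cols.getD (c % width) []).getD (r % depth) 0 - 1
        + ((c / width : Nat) : Int) + ((r / depth : Nat) : Int)) 9 + 1))

-- ===== PRECONDITION & SPEC =====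
-- Pre_ excludes the empty list (A's input_array[0] raises IndexError) and ragged inputs:
-- a row longer than the first makes A raise IndexError, a shorter one leaves None cells
-- in A's result (not a value of type list[list[int]]), and B's strict zip raises there.
def Pre_increment_array (input_array : List (List Int)) : Prop :=
  input_array ≠ [] ∧ ∀ row ∈ input_array, row.length = (input_array.headD []).length
instance (input_array : List (List Int)) : Decidable (Pre_increment_array input_array) := by
  unfold Pre_increment_array; infer_instance
def pvWitness_increment_array : List (List Int) := [[1, 2], [3, 4]]

def Spec_increment_array (input_array : List (List Int)) (out : List (List Int)) : Prop := out = increment_array_alt input_array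
instance (input_array : List (List Int)) (out : List (List Int)) : Decidable (Spec_increment_array input_array out) := by unfold Spec_increment_array; infer_instance

-- ===== CLAIM (what is proved, stated in full; the proofs are below) =====
def Claim_equal_increment_array : Prop := ∀ (input_array : List (List Int)), Dom_increment_array input_array → Pre_increment_array input_array → Spec_increment_array input_array (increment_array input_array)

-- ===== LEMMAS AND PROOFS =====

-- reading a cell of the Option grid
def pvGetCell (g : List (List (Option Int))) (r c : Nat) : Option Int :=
  (g.getD r []).getD c none

-- one write, as a (row, col, value) triple
def pvApplyW (g : List (List (Option Int))) (w : Int × Int × Int) : List (List (Option Int)) :=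
  pvSetCell g w.1 w.2.1 w.2.2

-- A's value for source value val and tile offsets i, j
def pvVal (val i j : Int) : Int :=
  if PySem.Int.mod (val + i + j) 9 ≠ 0 then PySem.Int.mod (val + i + j) 9 else 9

-- the flattened write list of A's four nested loops
def pvWrites (input_array : List (List Int)) : List (Int × Int × Int) :=
  let width : Int := (input_array.headD []).length
  let depth : Int := input_array.length
  (PySem.List.enumerate input_array 0).flatMap (fun rc =>
    (PySem.List.enumerate rc.2 0).flatMap (fun cv =>
      (PySem.List.pyRange 0 5 1).flatMap (fun i =>
        (PySem.List.pyRange 0 5 1).map (fun j =>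
          (rc.1 + j * depth, cv.1 + i * width, pvVal cv.2 i j)))))

lemma pvFold_eq_writes (input_array : List (List Int)) (g : List (List (Option Int))) :
    (pvWrites input_array).foldl pvApplyW g =
    (PySem.List.enumerate input_array 0).foldl (fun out rc =>
      (PySem.List.enumerate rc.2 0).foldl (fun out cv =>
        (PySem.List.pyRange 0 5 1).foldl (fun out i =>
          (PySem.List.pyRange 0 5 1).foldl (fun out j =>
            pvSetCell out (rc.1 + j * (input_array.length : Int))
              (cv.1 + i * ((input_array.headD []).length : Int))
              (if PySem.Int.mod (cv.2 + i + j) 9 ≠ 0 then PySem.Int.mod (cv.2 + i + j) 9 else 9))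
          out) out) out) g := by
  simp [pvWrites, List.foldl_flatMap, List.foldl_map, pvApplyW, pvVal]

lemma getD_pvSetCell (g : List (List (Option Int))) (r c : Int) (v : Int) (r' : Nat) :
    (pvSetCell g r c v).getD r' [] =
      if r' = r.toNat then (g.getD r.toNat []).set c.toNat (some v) else g.getD r' [] := by
  unfold pvSetCell
  simp only [List.getD_eq_getElem?_getD, List.getElem?_modify]
  by_cases he : r' = r.toNat
  · subst he
    cases g[r.toNat]? <;> simp
  · have : ¬ r.toNat = r' := fun hh => he hh.symm
    simp [this, he]

lemma pvGetCell_set (g : List (List (Option Int))) (r c : Int) (v : Int) (r' c' : Nat) :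
    pvGetCell (pvSetCell g r c v) r' c' =
      if r' = r.toNat ∧ c' = c.toNat ∧ c.toNat < (g.getD r.toNat []).length then some v
      else pvGetCell g r' c' := by
  unfold pvGetCell
  rw [getD_pvSetCell]
  set row := g.getD r.toNat [] with hrowdef
  by_cases hr : r' = r.toNat
  · rw [if_pos hr, hr]
    by_cases hc : c' = c.toNat
    · rw [hc]
      by_cases hl : c.toNat < row.length
      · rw [if_pos ⟨rfl, rfl, hl⟩, List.getD_eq_getElem?_getD, List.getElem?_set]
        simp [hl]
      · rw [if_neg (by tauto)]
        simp [List.getD_eq_getElem?_getD, hl]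
        have hnone : (g[r.toNat]?.getD ([] : List (Option Int)))[c.toNat]? = none :=
          List.getElem?_eq_none_iff.mpr (Nat.le_of_not_lt hl)
        rw [hnone]
        rfl
    · have hcc : ¬ c.toNat = c' := fun hh => hc hh.symm
      rw [if_neg (by tauto)]
      simp [List.getD_eq_getElem?_getD, hrowdef, hcc]
  · rw [if_neg hr, if_neg (by tauto)]

lemma pvRowlen_applyW (g : List (List (Option Int))) (w : Int × Int × Int) (r : Nat) :
    ((pvApplyW g w).getD r []).length = (g.getD r []).length := by
  unfold pvApplyW
  rw [getD_pvSetCell]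
  split_ifs with h
  · rw [h, List.length_set]
  · rfl

lemma pvLength_applyW (g : List (List (Option Int))) (w : Int × Int × Int) :
    (pvApplyW g w).length = g.length := by
  simp [pvApplyW, pvSetCell]

lemma pvLength_foldl (ws : List (Int × Int × Int)) (g : List (List (Option Int))) :
    (ws.foldl pvApplyW g).length = g.length := by
  induction ws generalizing g with
  | nil => rfl
  | cons w ws ih => rw [List.foldl_cons, ih, pvLength_applyW]

lemma pvRowlen_foldl (ws : List (Int × Int × Int)) (g : List (List (Option Int))) (r : Nat) :
    ((ws.foldl pvApplyW g).getD r []).length = (g.getD r []).length := by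
  induction ws generalizing g with
  | nil => rfl
  | cons w ws ih => rw [List.foldl_cons, ih, pvRowlen_applyW]

-- the write-once fold lemma: if every write aimed at (r, c) carries the value v, the write
-- is in range, and either the cell already holds v or some write targets it, the final
-- grid holds v at (r, c)
lemma pvFoldl_get (ws : List (Int × Int × Int)) (g : List (List (Option Int)))
    (r c : Nat) (v : Int)
    (hnn : ∀ w ∈ ws, 0 ≤ w.1 ∧ 0 ≤ w.2.1)
    (hval : ∀ w ∈ ws, w.1 = (r : Int) → w.2.1 = (c : Int) → w.2.2 = v)
    (hc : c < (g.getD r []).length)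
    (hbase : pvGetCell g r c = some v ∨ ((r : Int), (c : Int), v) ∈ ws) :
    pvGetCell (ws.foldl pvApplyW g) r c = some v := by
  induction ws generalizing g with
  | nil =>
    rcases hbase with h | h
    · simpa using h
    · simp at h
  | cons w ws ih =>
    rw [List.foldl_cons]
    have hnn' := hnn w (List.mem_cons_self)
    apply ih (pvApplyW g w) (fun x hx => hnn x (List.mem_cons_of_mem _ hx))
      (fun x hx => hval x (List.mem_cons_of_mem _ hx))
    · rw [pvRowlen_applyW]; exact hc
    · by_cases htar : w.1 = (r : Int) ∧ w.2.1 = (c : Int)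
      · left
        have hv := hval w List.mem_cons_self htar.1 htar.2
        have h1 : w.1.toNat = r := by omega
        have h2 : w.2.1.toNat = c := by omega
        unfold pvApplyW
        rw [pvGetCell_set, h1, h2, if_pos ⟨rfl, rfl, hc⟩, hv]
      · have hne : ¬ (r = w.1.toNat ∧ c = w.2.1.toNat ∧ w.2.1.toNat < (g.getD w.1.toNat []).length) := by
          intro ⟨h1, h2, _⟩
          exact htar ⟨by omega, by omega⟩
        have hcell : pvGetCell (pvApplyW g w) r c = pvGetCell g r c := by
          unfold pvApplyW; rw [pvGetCell_set, if_neg hne]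
        rcases hbase with h | h
        · left; rw [hcell]; exact h
        · rcases List.mem_cons.mp h with h | h
          · exfalso; apply htar; rw [← h]; exact ⟨rfl, rfl⟩
          · right; exact h

-- membership characterization of enumerate
lemma pvMem_enumerate {α : Type} (xs : List α) (s : Int) (p : Int × α) :
    p ∈ PySem.List.enumerate xs s ↔ ∃ k : Nat, ∃ h : k < xs.length, p = (s + k, xs[k]) := by
  induction xs generalizing s with
  | nil => simp [PySem.List.enumerate_nil]
  | cons x xs ih =>
    rw [PySem.List.enumerate_cons, List.mem_cons, ih]
    constructor
    · rintro (h | ⟨k, hk, rfl⟩)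
      · exact ⟨0, by simp, by simpa using h⟩
      · exact ⟨k + 1, by simpa using hk, by simp; ring⟩
    · rintro ⟨k, hk, rfl⟩
      cases k with
      | zero => left; simp
      | succ k => right; exact ⟨k, by simpa using hk, by simp; ring⟩

-- membership characterization of A's write list, under the rectangularity precondition
lemma pvMem_writes (input_array : List (List Int))
    (hrect : ∀ row ∈ input_array, row.length = (input_array.headD []).length)
    (w : Int × Int × Int) :
    w ∈ pvWrites input_array ↔
      ∃ (ri : Nat) (hri : ri < input_array.length)
        (ci : Nat) (hci : ci < (input_array.headD []).length)
        (i : Nat) (_ : i < 5) (j : Nat) (_ : j < 5),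
        w = ((ri : Int) + (j : Int) * (input_array.length : Int),
             (ci : Int) + (i : Int) * ((input_array.headD []).length : Int),
             pvVal (input_array[ri][ci]'(by rw [hrect _ (List.getElem_mem hri)]; exact hci)) i j) := by
  unfold pvWrites
  simp only [List.mem_flatMap, List.mem_map, pvMem_enumerate, PySem.List.mem_pyRange_one]
  constructor
  · rintro ⟨rc, ⟨ri, hri, rfl⟩, cv, ⟨ci, hci, rfl⟩, i, hi, j, hj, rfl⟩
    have hlen := hrect _ (List.getElem_mem hri)
    replace hci : ci < input_array[ri].length := hci
    simp only [zero_add] at hci ⊢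
    refine ⟨ri, hri, ci, by omega, i.toNat, by omega, j.toNat, by omega, ?_⟩
    have hi' : (i.toNat : Int) = i := by omega
    have hj' : (j.toNat : Int) = j := by omega
    simp [hi', hj']
  · rintro ⟨ri, hri, ci, hci, i, hi, j, hj, rfl⟩
    have hlen := hrect _ (List.getElem_mem hri)
    refine ⟨(ri, input_array[ri]), ⟨ri, hri, by simp⟩,
           (ci, input_array[ri][ci]'(by omega)), ⟨ci, by show ci < input_array[ri].length; omega, by simp⟩,
           (i : Int), by omega, (j : Int), by omega, by simp⟩

-- the closed-form wrap: A's "9 if 0 else m" equals B's (v-1+i+j) % 9 + 1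
lemma pvVal_closed (val i j : Int) :
    pvVal val i j = PySem.Int.mod (val - 1 + i + j) 9 + 1 := by
  unfold pvVal
  simp only [PySem.Int.mod_eq_emod_of_pos (by norm_num : (0:Int) < 9)]
  split_ifs <;> omega

-- unique decomposition x + q * n with x < n
lemma pvSplit (x q n : Nat) (hx : x < n) :
    (x + q * n) % n = x ∧ (x + q * n) / n = q := by
  have hn : 0 < n := Nat.lt_of_le_of_lt (Nat.zero_le x) hx
  exact ⟨by rw [Nat.add_mul_mod_self_right, Nat.mod_eq_of_lt hx],
         by rw [Nat.add_mul_div_right _ _ hn, Nat.div_eq_of_lt hx, Nat.zero_add]⟩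

-- ===== VERDICT (by name: the statement is the Claim_ definition above) =====
theorem increment_array_spec : Claim_equal_increment_array := by
  intro input_array _hdom hpre
  unfold Spec_increment_array
  obtain ⟨hne, hrect⟩ := hpre
  have hd0pos : 0 < input_array.length := List.length_pos_iff.mpr hne
  set g0 : List (List (Option Int)) :=
    (List.range ((input_array.length : Int) * 5).toNat).map (fun _ =>
      (List.range (((input_array.headD []).length : Int) * 5).toNat).map
        (fun _ => (none : Option Int))) with hg0
  have hg0len : g0.length = input_array.length * 5 := by
    rw [hg0]; simp; omega
  have hg0mem : ∀ row' ∈ g0, row'.length = (input_array.headD []).length * 5 := by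
    intro row' hrow'
    rw [hg0] at hrow'
    simp only [List.mem_map] at hrow'
    obtain ⟨_, _, rfl⟩ := hrow'
    simp; omega
  have hg0row : ∀ r : Nat, (g0.getD r []).length ≤ (input_array.headD []).length * 5 ∧
      (r < input_array.length * 5 → (g0.getD r []).length = (input_array.headD []).length * 5) := by
    intro r
    constructor
    · by_cases h : r < g0.length
      · rw [List.getD_eq_getElem _ _ h]
        exact le_of_eq (hg0mem _ (List.getElem_mem h))
      · rw [List.getD_eq_getElem?_getD, List.getElem?_eq_none_iff.mpr (Nat.le_of_not_lt h)]
        simp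
    · intro hr
      have h : r < g0.length := by omega
      rw [List.getD_eq_getElem _ _ h]
      exact hg0mem _ (List.getElem_mem h)
  have hA : increment_array input_array =
      ((pvWrites input_array).foldl pvApplyW g0).map (fun rw => rw.map (fun o => o.getD 0)) := by
    simp only [increment_array, hg0]
    rw [pvFold_eq_writes]
  set G := (pvWrites input_array).foldl pvApplyW g0 with hG
  have hGlen : G.length = input_array.length * 5 := by rw [hG, pvLength_foldl, hg0len]
  have hGrow : ∀ r : Nat, r < input_array.length * 5 →
      (G.getD r []).length = (input_array.headD []).length * 5 := by
    intro r hr; rw [hG, pvRowlen_foldl]; exact (hg0row r).2 hr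
  -- the value held at each cell of G
  have hcell : ∀ (r c : Nat), r < input_array.length * 5 → c < (input_array.headD []).length * 5 →
      pvGetCell G r c = some (pvVal
        ((input_array.getD (r % input_array.length) []).getD (c % (input_array.headD []).length) 0)
        ((c / (input_array.headD []).length : Nat) : Int)
        ((r / input_array.length : Nat) : Int)) := by
    intro r c hr hc
    have hw0pos : 0 < (input_array.headD []).length := by omega
    have hrm : r % input_array.length < input_array.length := Nat.mod_lt r hd0pos
    have hcm : c % (input_array.headD []).length < (input_array.headD []).length := Nat.mod_lt c hw0pos
    have hrd : r / input_array.length < 5 := by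
      rw [Nat.div_lt_iff_lt_mul hd0pos]; omega
    have hcd : c / (input_array.headD []).length < 5 := by
      rw [Nat.div_lt_iff_lt_mul hw0pos]; omega
    apply pvFoldl_get
    · intro w hw
      rw [pvMem_writes input_array hrect] at hw
      obtain ⟨ri, hri, ci, hci, i, hi, j, hj, rfl⟩ := hw
      constructor <;> positivity
    · intro w hw h1 h2
      rw [pvMem_writes input_array hrect] at hw
      obtain ⟨ri, hri, ci, hci, i, hi, j, hj, rfl⟩ := hw
      simp only at h1 h2 ⊢
      have hn1 : ri + j * input_array.length = r := by exact_mod_cast h1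
      have hn2 : ci + i * (input_array.headD []).length = c := by exact_mod_cast h2
      obtain ⟨er, ej⟩ := pvSplit ri j input_array.length hri
      obtain ⟨ec, ei⟩ := pvSplit ci i (input_array.headD []).length hci
      rw [hn1] at er ej
      rw [hn2] at ec ei
      rw [er, ej, ec, ei]
      congr 1
      rw [List.getD_eq_getElem _ _ hri,
          List.getD_eq_getElem _ _ (by rw [hrect _ (List.getElem_mem hri)]; exact hci)]
    · rw [(hg0row r).2 hr]; exact hc
    · right
      rw [pvMem_writes input_array hrect]
      refine ⟨r % input_array.length, hrm, c % (input_array.headD []).length, hcm,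
        c / (input_array.headD []).length, hcd, r / input_array.length, hrd, ?_⟩
      have e1 : (r : Int) = ((r % input_array.length : Nat) : Int) +
          ((r / input_array.length : Nat) : Int) * (input_array.length : Int) := by
        exact_mod_cast (Nat.mod_add_div' r input_array.length).symm
      have e2 : (c : Int) = ((c % (input_array.headD []).length : Nat) : Int) +
          ((c / (input_array.headD []).length : Nat) : Int) * ((input_array.headD []).length : Int) := by
        exact_mod_cast (Nat.mod_add_div' c (input_array.headD []).length).symm
      refine Prod.ext e1 (Prod.ext e2 ?_)
      simp only
      congr 1
      rw [List.getD_eq_getElem _ _ hrm,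
          List.getD_eq_getElem _ _ (by rw [hrect _ (List.getElem_mem hrm)]; exact hcm)]
  -- assemble: compare with B cell by cell
  have hW : (pvCols input_array).length = (input_array.headD []).length := by
    simp [pvCols]
  have hcols : ∀ (r c : Nat), r < input_array.length * 5 → c < (input_array.headD []).length * 5 →
      ((pvCols input_array).getD (c % (input_array.headD []).length) []).getD (r % input_array.length) 0 =
      (input_array.getD (r % input_array.length) []).getD (c % (input_array.headD []).length) 0 := by
    intro r c hr hc
    have hw0pos : 0 < (input_array.headD []).length := by omega
    have hrm : r % input_array.length < input_array.length := Nat.mod_lt r hd0pos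
    have hcm : c % (input_array.headD []).length < (input_array.headD []).length := Nat.mod_lt c hw0pos
    have hcb : c % (input_array.headD []).length < (pvCols input_array).length := by omega
    rw [List.getD_eq_getElem _ _ hcb]
    simp only [pvCols, List.getElem_map, List.getElem_range]
    have hrb : r % input_array.length <
        (input_array.map (fun row => row.getD (c % (input_array.headD []).length) 0)).length := by
      simp; omega
    rw [List.getD_eq_getElem _ _ hrb, List.getElem_map,
        List.getD_eq_getElem _ _ (by omega : r % input_array.length < input_array.length)]
  rw [hA]
  simp only [increment_array_alt]
  apply List.ext_getElem
  · simp [hGlen, hW]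
  intro r h1 h2
  simp only [List.length_map, List.length_range] at h1 h2
  apply List.ext_getElem
  · simp only [List.getElem_map, List.length_map, List.getElem_range, List.length_range]
    rw [← List.getD_eq_getElem G [] h1, hGrow r (by omega), hW]
  intro c hc1 hc2
  simp only [List.length_map, List.getElem_map, List.length_range, List.getElem_range] at hc1 hc2 ⊢
  rw [hW] at hc2 ⊢
  have hcell' := hcell r c (by omega) (by omega)
  have hbound : c < (G[r]'h1).length := hc1
  have hx : pvGetCell G r c = (G[r]'h1)[c]'hbound := by
    unfold pvGetCell
    rw [List.getD_eq_getElem G [] h1]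
    rw [List.getD_eq_getElem _ _ hbound]
  rw [← hx, hcell', pvVal_closed, Option.getD_some, hcols r c (by omega) (by omega)]
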